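-- pv_equiv track=rewrite | github.com/amazon-science/CTF-Dojo | forge/files.py | filter_out_patched_files
-- ===== SOURCE A (Python) =====
-- from typing import Dict, List, Optional
--
-- def filter_out_patched_files(files: List[str]) -> List[str]:
--     """
--     Filter out patched files when both original and patched versions exist.
--     If both 'x' and 'x_patched' exist, choose 'x' and exclude 'x_patched'.
--     """
--     file_set = set(files)
--     filtered_files = []
--
--     for file_path in files:
--         if file_path.endswith('_patched'):
--             original_file = file_path[:-8]
--             if original_file in file_set:
--                 continue
--         filtered_files.append(file_path)
--
--     return filtered_files
-- ===== SOURCE B (Python) =====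
-- def filter_out_patched_files(files):
--     originals = sorted(set(files))
--     patched_forms = sorted(x + '_patched' for x in set(files))
--     drop = []
--     i = 0
--     j = 0
--     while i < len(originals) and j < len(patched_forms):
--         if originals[i] < patched_forms[j]:
--             i += 1
--         elif patched_forms[j] < originals[i]:
--             j += 1
--         else:
--             drop.append(originals[i])
--             i += 1
--             j += 1
--     dropset = set(drop)
--     return [f for f in files if f not in dropset]
-- ===== Notes on version B (the rewrite author's own statement) =====
-- stated objective: alternative
-- what changed: Replaces A's hash-set lookup with endswith/suffix-stripping inside the loop by sort-then-merge: sorts the distinct names and the forward-concatenated candidates x+'_patched', intersects the two sorted lists with a two-pointer walk to get the drop set, then filters.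
import Mathlib
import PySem

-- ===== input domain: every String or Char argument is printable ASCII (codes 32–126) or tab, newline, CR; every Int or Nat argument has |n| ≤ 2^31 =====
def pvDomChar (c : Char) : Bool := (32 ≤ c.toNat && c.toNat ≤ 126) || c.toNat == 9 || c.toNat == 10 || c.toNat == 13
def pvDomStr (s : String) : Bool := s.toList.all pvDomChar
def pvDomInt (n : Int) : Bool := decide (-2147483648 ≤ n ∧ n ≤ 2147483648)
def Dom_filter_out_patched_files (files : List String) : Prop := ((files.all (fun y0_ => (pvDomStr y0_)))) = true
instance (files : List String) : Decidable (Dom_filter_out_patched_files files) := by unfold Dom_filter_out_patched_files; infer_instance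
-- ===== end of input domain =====

-- B replaces A's hash-set + endswith/suffix-stripping filter loop by sort-then-merge: two sorted
-- distinct lists (names, and forward-concatenated candidates x ++ "_patched") are intersected by a
-- two-pointer walk, and the list is filtered against that intersection; objective: alternative.

-- ===== PORT A =====
def filter_out_patched_files (files : List String) : List String :=
  let file_set : PySem.Set String := PySem.Set.ofList files
  files.foldl (fun filtered_files file_path =>
    if PySem.Str.endswith file_path "_patched" then
      let original_file := PySem.Str.slice file_path none (some (-8))
      if PySem.Set.contains file_set original_file then
        filtered_files
      else
        filtered_files ++ [file_path]
    else
      filtered_files ++ [file_path]) []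

-- ===== PORT B =====
-- Source B's while loop over indices i, j: ported as recursion on the unprocessed suffixes
def pvMergeInter : List String → List String → List String
  | [], _ => []
  | _ :: _, [] => []
  | a :: as_, b :: bs =>
    if a < b then pvMergeInter as_ (b :: bs)
    else if b < a then pvMergeInter (a :: as_) bs
    else a :: pvMergeInter as_ bs
  termination_by l1 l2 => l1.length + l2.length
  decreasing_by all_goals (simp <;> omega)

def filter_out_patched_files_alt (files : List String) : List String :=
  let originals := PySem.List.sorted (PySem.Set.ofList files) (fun x => x) false
  let patched_forms :=
    PySem.List.sorted ((PySem.Set.ofList files).map (fun x => x ++ "_patched")) (fun x => x) false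
  let drop := pvMergeInter originals patched_forms
  let dropset : PySem.Set String := PySem.Set.ofList drop
  files.filter (fun f => !(PySem.Set.contains dropset f))

-- ===== PRECONDITION & SPEC =====
def Spec_filter_out_patched_files (files : List String) (out : List String) : Prop := out = filter_out_patched_files_alt files
instance (files : List String) (out : List String) : Decidable (Spec_filter_out_patched_files files out) := by unfold Spec_filter_out_patched_files; infer_instance

-- ===== CLAIM (what is proved, stated in full; the proofs are below) =====
def Claim_equal_filter_out_patched_files : Prop := ∀ (files : List String), Dom_filter_out_patched_files files → Spec_filter_out_patched_files files (filter_out_patched_files files)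

-- ===== LEMMAS AND PROOFS =====

-- A's drop test, as a Bool predicate on one element.
def pvDropA (files : List String) (f : String) : Bool :=
  PySem.Str.endswith f "_patched" &&
    PySem.Set.contains (PySem.Set.ofList files) (PySem.Str.slice f none (some (-8)))

theorem pvSliceAppend (x : String) :
    PySem.Str.slice (x ++ "_patched") none (some (-8)) = x := by
  apply String.toList_injective
  rw [PySem.Str.toList_slice]
  rw [show PySem.Chars.slice (x ++ "_patched").toList none (some (-8))
        = PySem.List.slice (x ++ "_patched").toList none (some (-8)) from rfl]
  rw [PySem.List.slice_to_neg_ofNat _ 8 (by omega)]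
  simp

-- A's drop test holds exactly when some g in files forward-concatenates to f.
theorem pvDropA_iff_exists (files : List String) (f : String) :
    pvDropA files f = true ↔ ∃ g ∈ files, g ++ "_patched" = f := by
  unfold pvDropA
  simp only [Bool.and_eq_true]
  constructor
  · rintro ⟨he, hc⟩
    rw [PySem.Str.endswith_eq] at he
    obtain ⟨t, ht⟩ := (PySem.Chars.endswith_iff _ _).mp he
    have hfx : (PySem.Str.slice f none (some (-8))) ++ "_patched" = f := by
      apply String.toList_injective
      rw [String.toList_append, PySem.Str.toList_slice]
      rw [show PySem.Chars.slice f.toList none (some (-8))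
            = PySem.List.slice f.toList none (some (-8)) from rfl]
      rw [PySem.List.slice_to_neg_ofNat _ 8 (by omega)]
      have : f.toList = t ++ "_patched".toList := ht.symm
      rw [this]; simp
    rw [PySem.Set.contains_iff, PySem.Set.mem_ofList] at hc
    exact ⟨_, hc, hfx⟩
  · rintro ⟨g, hg, rfl⟩
    refine ⟨?_, ?_⟩
    · rw [PySem.Str.endswith_eq]
      exact (PySem.Chars.endswith_iff _ _).mpr ⟨g.toList, by simp⟩
    · rw [pvSliceAppend, PySem.Set.contains_iff, PySem.Set.mem_ofList]; exact hg

-- the two-pointer walk over two strictly increasing lists computes their intersection (as members)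
theorem mem_pvMergeInter (l1 l2 : List String)
    (h1 : l1.Pairwise (· < ·)) (h2 : l2.Pairwise (· < ·)) (f : String) :
    f ∈ pvMergeInter l1 l2 ↔ f ∈ l1 ∧ f ∈ l2 := by
  fun_induction pvMergeInter l1 l2 with
  | case1 l2 => simp
  | case2 a as_ => simp
  | case3 a as_ b bs hab ih =>
    rw [ih h1.tail h2]
    have hnab : a ∉ b :: bs := by
      intro hmem
      rcases List.mem_cons.mp hmem with h | h
      · exact absurd (h ▸ hab) (lt_irrefl _)
      · exact absurd (lt_trans hab (List.rel_of_pairwise_cons h2 h)) (lt_irrefl _)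
    constructor
    · rintro ⟨hf1, hf2⟩; exact ⟨List.mem_cons_of_mem _ hf1, hf2⟩
    · rintro ⟨hf1, hf2⟩
      rcases List.mem_cons.mp hf1 with rfl | h
      · exact absurd hf2 hnab
      · exact ⟨h, hf2⟩
  | case4 a as_ b bs hab hba ih =>
    rw [ih h1 h2.tail]
    have hnba : b ∉ a :: as_ := by
      intro hmem
      rcases List.mem_cons.mp hmem with h | h
      · exact absurd (h ▸ hba) (lt_irrefl _)
      · exact absurd (lt_trans hba (List.rel_of_pairwise_cons h1 h)) (lt_irrefl _)
    constructor
    · rintro ⟨hf1, hf2⟩; exact ⟨hf1, List.mem_cons_of_mem _ hf2⟩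
    · rintro ⟨hf1, hf2⟩
      rcases List.mem_cons.mp hf2 with rfl | h
      · exact absurd hf1 hnba
      · exact ⟨hf1, h⟩
  | case5 a as_ b bs hab hba ih =>
    have hba' : b = a := le_antisymm (not_lt.mp hab) (not_lt.mp hba)
    subst hba'
    rw [List.mem_cons, ih h1.tail h2.tail]
    constructor
    · rintro (rfl | ⟨hf1, hf2⟩)
      · exact ⟨List.mem_cons_self, List.mem_cons_self⟩
      · exact ⟨List.mem_cons_of_mem _ hf1, List.mem_cons_of_mem _ hf2⟩
    · rintro ⟨hf1, hf2⟩
      rcases List.mem_cons.mp hf1 with rfl | h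
      · exact Or.inl rfl
      · rcases List.mem_cons.mp hf2 with rfl | h'
        · exact Or.inl rfl
        · exact Or.inr ⟨h, h'⟩

-- a sorted list without duplicates is strictly increasing
theorem pairwise_lt_of_sorted_nodup (l : List String) (hnd : l.Nodup) :
    (PySem.List.sorted l (fun x => x) false).Pairwise (· < ·) := by
  have hle := PySem.List.sorted_pairwise (xs := l) (key := fun x => x)
  have hnd' : (PySem.List.sorted l (fun x => x) false).Nodup :=
    (PySem.List.sorted_perm l (fun x => x) false).nodup_iff.mpr hnd
  exact (hle.and hnd').imp (fun ⟨h1, h2⟩ => lt_of_le_of_ne h1 h2)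

-- appending a fixed suffix is injective
theorem append_patched_injective : Function.Injective (fun x : String => x ++ "_patched") := by
  intro x y h
  apply String.toList_injective
  have := congrArg String.toList h
  simp only [String.toList_append] at this
  exact List.append_cancel_right this

-- ===== VERDICT (by name: the statement is the Claim_ definition above) =====
theorem filter_out_patched_files_spec : Claim_equal_filter_out_patched_files := by
  intro files _
  unfold Spec_filter_out_patched_files filter_out_patched_files filter_out_patched_files_alt
  simp only
  have hA : List.foldl (fun filtered_files file_path =>
      if PySem.Str.endswith file_path "_patched" = true then
        if PySem.Set.contains (PySem.Set.ofList files)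
            (PySem.Str.slice file_path none (some (-8))) = true then
          filtered_files
        else filtered_files ++ [file_path]
      else filtered_files ++ [file_path]) [] files
      = files.filter (fun f => !(pvDropA files f)) := by
    have hfun : (fun (filtered_files : List String) (file_path : String) =>
        if PySem.Str.endswith file_path "_patched" = true then
          if PySem.Set.contains (PySem.Set.ofList files)
              (PySem.Str.slice file_path none (some (-8))) = true then
            filtered_files
          else filtered_files ++ [file_path]
        else filtered_files ++ [file_path])
        = (fun acc f => if (!(pvDropA files f)) = true then acc ++ [id f] else acc) := by
      funext acc f
      unfold pvDropA
      cases he : PySem.Str.endswith f "_patched" <;>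
        cases hcon : PySem.Set.contains (PySem.Set.ofList files)
          (PySem.Str.slice f none (some (-8))) <;> simp
    rw [hfun, PySem.List.foldl_append_if]
    simp
  rw [hA]
  apply List.filter_congr
  intro f hf
  have h1 : (PySem.List.sorted (PySem.Set.ofList files) (fun x => x) false).Pairwise (· < ·) :=
    pairwise_lt_of_sorted_nodup _ (PySem.Set.nodup_ofList files)
  have h2 : (PySem.List.sorted ((PySem.Set.ofList files).map (fun x => x ++ "_patched"))
      (fun x => x) false).Pairwise (· < ·) :=
    pairwise_lt_of_sorted_nodup _
      ((PySem.Set.nodup_ofList files).map append_patched_injective)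
  have hmem : (PySem.Set.contains (PySem.Set.ofList
      (pvMergeInter (PySem.List.sorted (PySem.Set.ofList files) (fun x => x) false)
        (PySem.List.sorted ((PySem.Set.ofList files).map (fun x => x ++ "_patched"))
          (fun x => x) false))) f = true)
      ↔ (f ∈ files ∧ ∃ g ∈ files, g ++ "_patched" = f) := by
    rw [PySem.Set.contains_iff, PySem.Set.mem_ofList, mem_pvMergeInter _ _ h1 h2,
      PySem.List.mem_sorted, PySem.List.mem_sorted, PySem.Set.mem_ofList, List.mem_map]
    constructor
    · rintro ⟨hf1, x, hx, rfl⟩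
      exact ⟨hf1, x, (PySem.Set.mem_ofList _ _).mp hx, rfl⟩
    · rintro ⟨hf1, g, hg, rfl⟩
      exact ⟨hf1, g, (PySem.Set.mem_ofList _ _).mpr hg, rfl⟩
  congr 1
  rcases hd : pvDropA files f with _ | _
  · rcases hc : PySem.Set.contains _ f with _ | _
    · rfl
    · exact absurd ((pvDropA_iff_exists files f).mpr (hmem.mp hc).2) (by simp [hd])
  · exact (hmem.mpr ⟨hf, (pvDropA_iff_exists files f).mp hd⟩).symm
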